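-- pv_equiv track=rewrite | github.com/sky-butterfly/coding-test | 프로그래머스/Level_0/진료순서 정하기.py | solution
-- ===== SOURCE A (Python) =====
-- def solution(emergency):
--     answer = []
--     obj = {}
--
--     tmp = sorted(emergency, reverse=True)
--
--     for i in range(1, len(tmp)+1):
--         obj[tmp[i-1]] = i
--
--     for e in emergency:
--         answer.append(obj[e])
--
--     return answer
-- ===== SOURCE B (Python) =====
-- def solution(emergency):
--     return [sum(1 for x in emergency if x >= e) for e in emergency]
-- ===== Notes on version B (the rewrite author's own statement) =====
-- stated objective: simpler
-- what changed: Replaces the sort + rank-dictionary construction + lookup pass with a one-line comprehension that computes each rank directly as the count of elements >= e (the >= comparator reproduces A's tie behaviour, where the dict stores the last index of each duplicate).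
import Mathlib
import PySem

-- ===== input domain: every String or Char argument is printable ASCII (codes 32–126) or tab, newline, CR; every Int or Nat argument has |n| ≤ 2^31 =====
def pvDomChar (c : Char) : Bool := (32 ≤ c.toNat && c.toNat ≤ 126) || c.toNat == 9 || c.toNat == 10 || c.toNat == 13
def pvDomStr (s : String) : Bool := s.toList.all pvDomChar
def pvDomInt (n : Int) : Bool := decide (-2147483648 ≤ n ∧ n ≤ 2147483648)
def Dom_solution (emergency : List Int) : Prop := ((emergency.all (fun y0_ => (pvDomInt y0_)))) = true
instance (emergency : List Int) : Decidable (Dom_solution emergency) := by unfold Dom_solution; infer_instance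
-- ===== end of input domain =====

-- B replaces A's sort + rank-dictionary with a direct count of elements ≥ e for each e (simpler, no sort).

-- ===== PORT A =====
-- Literal port of A: sort descending, build the rank dict over range(1, len+1)
-- (tmp[i-1] is always in range, so pyGetD's default 0 is never used), then append lookups.
-- obj[e] never raises KeyError (every e of emergency is a key), so getD's default 0 is never used.
def solution (emergency : List Int) : List Int :=
  let tmp := PySem.List.sorted emergency (fun x => x) true
  let obj := (PySem.List.pyRange 1 ((tmp.length : Int) + 1) 1).foldl
      (fun o i => o.insert (PySem.List.pyGetD tmp (i - 1) 0) i) (PySem.Dict.empty : PySem.Dict Int Int)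
  emergency.foldl (fun answer e => answer ++ [obj.getD e 0]) []

-- ===== PORT B =====
-- Literal port of B: [sum(1 for x in emergency if x >= e) for e in emergency]
def solution_alt (emergency : List Int) : List Int :=
  emergency.map (fun e => emergency.foldl (fun s x => if e ≤ x then s + 1 else s) (0 : Int))

-- ===== PRECONDITION & SPEC =====
def Spec_solution (emergency : List Int) (out : List Int) : Prop := out = solution_alt emergency
instance (emergency : List Int) (out : List Int) : Decidable (Spec_solution emergency out) := by unfold Spec_solution; infer_instance

-- ===== CLAIM (what is proved, stated in full; the proofs are below) =====
def Claim_equal_solution : Prop := ∀ (emergency : List Int), Dom_solution emergency → Spec_solution emergency (solution emergency)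

-- ===== LEMMAS AND PROOFS =====

-- structural form of A's dict-building loop, for the proofs
def buildD : List Int → Int → PySem.Dict Int Int → PySem.Dict Int Int
  | [], _, d => d
  | x :: xs, k, d => buildD xs (k + 1) (d.insert x k)

-- A's pyRange fold equals the structural recursion buildD
theorem foldl_range_eq_buildD (tmp : List Int) : ∀ (j : Nat) (d : PySem.Dict Int Int),
    (PySem.List.pyRange ((j : Int) + 1) ((tmp.length : Int) + 1) 1).foldl
      (fun o i => o.insert (PySem.List.pyGetD tmp (i - 1) 0) i) d
      = buildD (tmp.drop j) ((j : Int) + 1) d := by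
  intro j
  induction hn : tmp.length - j generalizing j with
  | zero =>
    intro d
    have hj : tmp.length ≤ j := by omega
    rw [PySem.List.pyRange_one_eq_nil (by exact_mod_cast Nat.succ_le_succ hj),
        List.drop_eq_nil_of_le hj]
    rfl
  | succ n ih =>
    intro d
    have hj : j < tmp.length := by omega
    rw [PySem.List.pyRange_one_cons (by exact_mod_cast Nat.succ_lt_succ hj)]
    have hget : PySem.List.pyGetD tmp (((j : Int) + 1) - 1) 0 = tmp[j] := by
      rw [show ((j : Int) + 1) - 1 = (j : Int) by ring, PySem.List.pyGetD_natCast, List.getD_eq_getElem tmp 0 hj]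
    have hdrop : tmp.drop j = tmp[j] :: tmp.drop (j + 1) := List.drop_eq_getElem_cons hj
    rw [List.foldl_cons, hget, hdrop, buildD]
    have := ih (j + 1) (by omega) (d.insert tmp[j] ((j : Int) + 1))
    push_cast at this ⊢
    rw [show (j : Int) + 1 + 1 = (j + 1 : Int) + 1 by ring] at this ⊢
    exact this

-- keys inserted by buildD are exactly the list's elements
theorem buildD_getD_of_not_mem (xs : List Int) (e : Int) (he : e ∉ xs) :
    ∀ (k : Int) (d : PySem.Dict Int Int), (buildD xs k d).getD e 0 = d.getD e 0 := by
  induction xs with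
  | nil => intro k d; rfl
  | cons x xs ih =>
    intro k d
    have hx : e ≠ x := fun h => he (h ▸ List.mem_cons_self)
    rw [buildD, ih (fun h => he (List.mem_cons_of_mem _ h))]
    exact PySem.Dict.getD_insert_of_ne d k 0 hx

-- on a descending list, buildD's final value at key e is k - 1 + (count of elements ≥ e)
theorem buildD_getD_of_mem (xs : List Int) (e : Int) :
    xs.Pairwise (fun a b => b ≤ a) → e ∈ xs →
    ∀ (k : Int) (d : PySem.Dict Int Int),
      (buildD xs k d).getD e 0 = k - 1 + (xs.countP (fun x => e ≤ x) : Int) := by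
  induction xs with
  | nil => intro _ h; exact absurd h (List.not_mem_nil)
  | cons x xs ih =>
    intro hp hm k d
    rw [List.pairwise_cons] at hp
    by_cases he : e ∈ xs
    · have hle : e ≤ x := le_of_eq_of_le rfl (hp.1 e he)
      rw [buildD, ih hp.2 he (k + 1) (d.insert x k), List.countP_cons]
      simp only [hle, decide_true, if_true]
      push_cast
      ring
    · have hex : e = x := by
        rcases List.mem_cons.mp hm with h | h
        · exact h
        · exact absurd h he
      subst hex
      rw [buildD, buildD_getD_of_not_mem xs e he (k + 1) (d.insert e k),
          PySem.Dict.getD_insert_self, List.countP_cons]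
      have hzero : xs.countP (fun x => e ≤ x) = 0 := by
        rw [List.countP_eq_zero]
        intro a ha
        have h1 : a ≤ e := hp.1 a ha
        simp only [decide_eq_true_eq]
        intro h2
        exact he ((le_antisymm h1 h2) ▸ ha)
      simp [hzero]

-- B's inner sum is countP
theorem foldl_sum_eq_countP (e : Int) (xs : List Int) :
    xs.foldl (fun s x => if e ≤ x then s + 1 else s) (0 : Int)
      = (xs.countP (fun x => e ≤ x) : Int) := by
  have h : ∀ (s : Int), xs.foldl (fun s x => if e ≤ x then s + 1 else s) s
      = s + (xs.countP (fun x => e ≤ x) : Int) := by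
    induction xs with
    | nil => intro s; simp
    | cons x xs ih =>
      intro s
      rw [List.foldl_cons, List.countP_cons]
      by_cases hx : e ≤ x
      · simp only [hx, if_true, ih, decide_true]
        push_cast
        ring
      · simp [hx, ih]
  simpa using h 0

-- ===== VERDICT (by name: the statement is the Claim_ definition above) =====
theorem solution_spec : Claim_equal_solution := by
  intro emergency _
  unfold Spec_solution solution solution_alt
  set tmp := PySem.List.sorted emergency (fun x => x) true with htmp
  have hperm : tmp.Perm emergency := PySem.List.sorted_perm emergency (fun x => x) true
  have hpair : tmp.Pairwise (fun a b => b ≤ a) := PySem.List.sorted_pairwise_rev emergency (fun x => x)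
  rw [PySem.List.foldl_append_singleton_eq_map]
  apply List.map_congr_left
  intro e he
  have hbridge := foldl_range_eq_buildD tmp 0 PySem.Dict.empty
  simp only [Nat.cast_zero, zero_add, List.drop_zero] at hbridge
  rw [hbridge, buildD_getD_of_mem tmp e hpair (hperm.mem_iff.mpr he) 1 PySem.Dict.empty,
      hperm.countP_eq, foldl_sum_eq_countP]
  ring
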